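-- pv_equiv track=rewrite | github.com/NVIDIA/dgxc-benchmarking | installer/installer.py | parse_gpu_gres
-- ===== SOURCE A (Python) =====
-- from typing import Any, Dict, Optional
--
-- def parse_gpu_gres(gres_output: str) -> Optional[int]:
--     """Extract the GPU count from a SLURM GRES string.
--
--     Accepted examples:
--         gpu:8
--         gpu:a100:8
--         gpu:8(S:0-1)
--         gpu:a100:8(S:0-1)
--         gpu:8,mib:100
--         gpu:a100_3g.20gb:2
--
--     Returns an integer within the range 1-8 or *None* when parsing fails.
--     """
--     if not gres_output or gres_output == "(null)" or "gpu:" not in gres_output: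
--         return None
--
--     # Keep the substring after "gpu:" then strip any extras after ',' or '('
--     gpu_part = gres_output.split("gpu:", 1)[1]
--     for sep in (",", "("):
--         gpu_part = gpu_part.split(sep, 1)[0]
--
--     # In cases like 'gpu:a100:8' keep only the numeric part after the last ':'
--     gpu_part = gpu_part.split(":")[-1].strip()
--
--     if not gpu_part.isdigit():
--         return None
--
--     count = int(gpu_part)
--     return count if 1 <= count <= 8 else None
-- ===== SOURCE B (Python) =====
-- def parse_gpu_gres(gres_output):
--     """Extract the GPU count from a SLURM GRES string.
--
--     Single left-to-right scan: locate "gpu:", then walk the following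
--     characters once, restarting the token at every ':' and stopping at
--     ',' or '('; the token left over is the candidate count.
--     """
--     i = gres_output.find("gpu:")
--     if i < 0:
--         return None
--     token = ""
--     for ch in gres_output[i + 4:]:
--         if ch in ",(":
--             break
--         if ch == ":":
--             token = ""
--         else:
--             token += ch
--     token = token.strip()
--     if not token.isdigit():
--         return None
--     count = int(token)
--     return count if 1 <= count <= 8 else None
-- ===== Notes on version B (the rewrite author's own statement) =====
-- stated objective: alternative
-- what changed: A's pipeline of repeated str.split calls (split('gpu:',1)[1], split(',',1)[0], split('(',1)[0], split(':')[-1]) is replaced by one find('gpu:') plus a single left-to-right character scan that stops at ',' or '(' and restarts the token after each ':'.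
import Mathlib
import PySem

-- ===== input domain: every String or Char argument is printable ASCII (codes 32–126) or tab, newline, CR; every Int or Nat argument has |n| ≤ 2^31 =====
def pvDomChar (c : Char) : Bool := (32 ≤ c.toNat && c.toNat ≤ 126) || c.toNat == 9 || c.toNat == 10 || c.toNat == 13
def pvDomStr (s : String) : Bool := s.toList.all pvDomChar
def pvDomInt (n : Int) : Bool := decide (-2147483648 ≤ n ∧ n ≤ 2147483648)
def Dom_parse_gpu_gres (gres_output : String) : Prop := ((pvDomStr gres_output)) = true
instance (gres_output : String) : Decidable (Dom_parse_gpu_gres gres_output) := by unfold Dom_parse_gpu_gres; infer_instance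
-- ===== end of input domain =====

-- B replaces A's chain of split() calls by a single left-to-right character scan after the
-- first "gpu:" (objective: alternative decomposition, same asymptotic cost); return values proved equal.

-- ===== PORT A =====
-- A: guard, split on "gpu:" (maxsplit 1) and keep [1], cut at the first "," and "(" via
-- split(sep,1)[0], keep the part after the last ":" via split(":")[-1], strip, isdigit, int, range check.
def parse_gpu_gres (gres_output : String) : Option Int :=
  let s := gres_output.toList
  if s.isEmpty || s == "(null)".toList || !(PySem.Chars.isIn "gpu:".toList s) then none
  else
    -- gpu_part = gres_output.split("gpu:", 1)[1]
    match PySem.List.pyGet? (PySem.Chars.splitOnMax s "gpu:".toList 1) 1 with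
    | none => none        -- unreachable: "gpu:" occurs in s, so the split has 2 pieces
    | some gp0 =>
      -- for sep in (",", "("): gpu_part = gpu_part.split(sep, 1)[0]
      let gp1 := [',', '('].foldl
        (fun gp sep => (PySem.List.pyGet? (PySem.Chars.splitOnMax gp [sep] 1) 0).getD []) gp0
      -- gpu_part = gpu_part.split(":")[-1].strip()
      let gp2 := PySem.Chars.strip ((PySem.List.pyGet? (PySem.Chars.splitOn gp1 [':']) (-1)).getD [])
      if !(PySem.Chars.strIsdigit gp2) then none
      else
        match PySem.Int.ofChars? gp2 with
        | none => none    -- unreachable: gp2 is nonempty and all ASCII digits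
        | some count => if 1 ≤ count ∧ count ≤ 8 then some count else none

-- ===== PORT B =====
-- the for-loop of Source B: break at ',' or '(', reset the token at ':', otherwise append the char
def pvScanTok : List Char → List Char → List Char
  | [], token => token
  | c :: rest, token =>
    if c = ',' ∨ c = '(' then token
    else if c = ':' then pvScanTok rest []
    else pvScanTok rest (token ++ [c])

def parse_gpu_gres_alt (gres_output : String) : Option Int :=
  let s := gres_output.toList
  let i := PySem.Chars.find s "gpu:".toList
  if i < 0 then none
  else
    let token := PySem.Chars.strip (pvScanTok (PySem.List.slice s (some (i + 4)) none) [])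
    if !(PySem.Chars.strIsdigit token) then none
    else
      match PySem.Int.ofChars? token with
      | none => none      -- unreachable: token is nonempty and all ASCII digits
      | some count => if 1 ≤ count ∧ count ≤ 8 then some count else none

-- ===== PRECONDITION & SPEC =====
def Spec_parse_gpu_gres (gres_output : String) (out : Option Int) : Prop := out = parse_gpu_gres_alt gres_output
instance (gres_output : String) (out : Option Int) : Decidable (Spec_parse_gpu_gres gres_output out) := by unfold Spec_parse_gpu_gres; infer_instance

-- ===== CLAIM (what is proved, stated in full; the proofs are below) =====
def Claim_equal_parse_gpu_gres : Prop := ∀ (gres_output : String), Dom_parse_gpu_gres gres_output → Spec_parse_gpu_gres gres_output (parse_gpu_gres gres_output)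

-- ===== LEMMAS AND PROOFS =====

def pvSp1 (sep : List Char) : List Char → Option (List Char × List Char)
  | [] => if sep.isPrefixOf [] then some ([], ([] : List Char).drop sep.length) else none
  | c :: rest =>
    if sep.isPrefixOf (c :: rest) then some ([], (c :: rest).drop sep.length)
    else (pvSp1 sep rest).map (fun p => (c :: p.1, p.2))
def pvLastSeg (d : Char) (l : List Char) : List Char :=
  (l.reverse.takeWhile (fun c => !(c == d))).reverse
def pvP (c : Char) : Bool := !(c == '(') && !(c == ',')

lemma pv_sp1_nil (sep : List Char) (h : sep ≠ []) : pvSp1 sep [] = none := by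
  cases sep with
  | nil => exact absurd rfl h
  | cons a t => simp [pvSp1, List.isPrefixOf]

lemma pv_sp1_drop (sep : List Char) : ∀ l a b, pvSp1 sep l = some (a, b) →
    b = l.drop (a.length + sep.length) := by
  intro l
  induction l with
  | nil =>
    intro a b h
    by_cases hp : sep.isPrefixOf ([] : List Char) <;> simp [pvSp1, hp] at h
    obtain ⟨rfl, rfl⟩ := h; simp
  | cons c rest ih =>
    intro a b h
    by_cases hp : sep.isPrefixOf (c :: rest)
    · simp [pvSp1, hp] at h; obtain ⟨rfl, rfl⟩ := h; simp
    · simp [pvSp1, hp] at h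
      obtain ⟨a1, hs, rfl⟩ := h
      have := ih a1 b hs
      have hlen : (c :: a1).length + sep.length = (a1.length + sep.length) + 1 := by
        simp [List.length_cons]; omega
      rw [hlen, List.drop_succ_cons]  -- drop (n+1) (c::rest) = drop n rest
      exact this

lemma pv_findGo (sep : List Char) (h : sep ≠ []) : ∀ (l : List Char) (k : Nat),
    PySem.Chars.find.go sep l k =
      (match pvSp1 sep l with
       | some p => ((k + p.1.length : Nat) : Int)
       | none => -1) := by
  intro l
  induction l with
  | nil =>
    intro k
    rw [pv_sp1_nil sep h]
    simp [PySem.Chars.find.go, List.isEmpty_iff, h]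
  | cons c rest ih =>
    intro k
    by_cases hp : sep.isPrefixOf (c :: rest)
    · simp [PySem.Chars.find.go, hp, pvSp1]
    · rw [show PySem.Chars.find.go sep (c :: rest) k = PySem.Chars.find.go sep rest (k+1) by
        simp [PySem.Chars.find.go, hp]]
      rw [ih]
      simp [pvSp1, hp]
      cases hs : pvSp1 sep rest with
      | none => simp
      | some p => simp; ring

lemma pv_lastSeg_not_mem (d : Char) (l : List Char) (h : d ∉ l) :
    pvLastSeg d l = l := by
  unfold pvLastSeg
  rw [List.takeWhile_eq_self_iff.mpr, List.reverse_reverse]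
  intro c hc
  simp only [List.mem_reverse] at hc
  simp
  intro heq
  subst heq
  exact h hc

lemma pv_tw_ne (p : Char → Bool) (l : List Char) (d : Char) (hd : d ∈ l) (hp : p d = false) :
    (l.takeWhile p).length ≠ l.length := by
  intro h
  have heq := (List.takeWhile_prefix (p := p) (l := l)).eq_of_length h
  have hm : d ∈ l.takeWhile p := by rw [heq]; exact hd
  have := List.mem_takeWhile_imp hm
  rw [hp] at this
  exact absurd this (by simp)

lemma pv_tw_full (p : Char → Bool) (l : List Char) (h : ∀ x ∈ l, p x = true) :
    l.takeWhile p = l := List.takeWhile_eq_self_iff.mpr h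

lemma pv_lastSeg_cons_mem (d c : Char) (rest : List Char) (h : rest.contains d = true) :
    pvLastSeg d (c :: rest) = pvLastSeg d rest := by
  unfold pvLastSeg
  rw [List.reverse_cons, List.takeWhile_append]
  have hd : d ∈ rest.reverse := by
    simp only [List.contains_eq_mem, decide_eq_true_eq] at h
    simpa using h
  rw [if_neg (pv_tw_ne _ _ d hd (by simp))]

lemma pv_scanTok : ∀ (l token : List Char),
    pvScanTok l token =
      (if (l.takeWhile pvP).contains ':' then pvLastSeg ':' (l.takeWhile pvP)
       else token ++ l.takeWhile pvP) := by
  intro l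
  induction l with
  | nil => intro token; simp [pvScanTok, pvLastSeg]
  | cons c rest ih =>
    intro token
    by_cases hb : c = ',' ∨ c = '('
    · have hP : pvP c = false := by rcases hb with rfl | rfl <;> simp [pvP]
      simp [pvScanTok, hb, List.takeWhile, hP]
    · have hP : pvP c = true := by
        push Not at hb
        simp [pvP, hb.1, hb.2]
      by_cases hc : c = ':'
      · subst hc
        rw [show pvScanTok (':' :: rest) token = pvScanTok rest [] by simp [pvScanTok, hb]]
        rw [ih]
        have htw : (':' :: rest).takeWhile pvP = ':' :: rest.takeWhile pvP := by
          simp [List.takeWhile, hP]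
        rw [htw]
        have hmem : (':' :: rest.takeWhile pvP).contains ':' = true := by simp
        rw [if_pos hmem]
        by_cases h2 : (rest.takeWhile pvP).contains ':'
        · rw [if_pos h2, pv_lastSeg_cons_mem ':' ':' _ h2]
        · rw [if_neg h2]
          have : pvLastSeg ':' (':' :: rest.takeWhile pvP) = rest.takeWhile pvP := by
            unfold pvLastSeg
            rw [List.reverse_cons, List.takeWhile_append]
            have hfull : List.takeWhile (fun c => !(c == ':')) (rest.takeWhile pvP).reverse
                = (rest.takeWhile pvP).reverse := by
              apply pv_tw_full
              intro x hx
              simp only [List.mem_reverse] at hx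
              simp only [Bool.not_eq_eq_eq_not, Bool.not_true, beq_eq_false_iff_ne, ne_eq]
              intro hxe
              subst hxe
              simp [List.contains_eq_mem] at h2
              exact h2 hx
            rw [if_pos (by rw [hfull])]
            simp [List.takeWhile]
          rw [this]; simp
      · rw [show pvScanTok (c :: rest) token = pvScanTok rest (token ++ [c]) by
          simp [pvScanTok, hb, hc]]
        rw [ih]
        have htw : (c :: rest).takeWhile pvP = c :: rest.takeWhile pvP := by
          simp [List.takeWhile, hP]
        rw [htw]
        by_cases h2 : (rest.takeWhile pvP).contains ':'
        · have : (c :: rest.takeWhile pvP).contains ':' = true := by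
            simp [List.contains_eq_mem] at h2 ⊢; exact Or.inr h2
          rw [if_pos h2, if_pos this, pv_lastSeg_cons_mem ':' c _ h2]
        · have : (c :: rest.takeWhile pvP).contains ':' = false := by
            simp [List.contains_eq_mem] at h2 ⊢
            exact ⟨fun h => hc h.symm, h2⟩
          rw [if_neg h2, if_neg (by rw [this]; simp)]
          simp

lemma pv_lastGo (d : Char) : ∀ (l : List Char) (fuel : Nat) (cur : List Char)
    (acc : List (List Char)), l.length ≤ fuel →
    (PySem.Chars.splitOn.go [d] fuel l cur acc).getLast? =
      some (if l.contains d then pvLastSeg d l else cur.reverse ++ l) := by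
  intro l
  induction l with
  | nil =>
    intro fuel cur acc _
    cases fuel <;> simp [PySem.Chars.splitOn.go, pvLastSeg]
  | cons c rest ih =>
    intro fuel cur acc hf
    cases fuel with
    | zero => simp at hf
    | succ n =>
      by_cases hcd : c = d
      · subst hcd
        rw [show PySem.Chars.splitOn.go [c] (n+1) (c :: rest) cur acc
            = PySem.Chars.splitOn.go [c] n rest [] (cur.reverse :: acc) by
          simp [PySem.Chars.splitOn.go, List.isPrefixOf]]
        rw [ih n [] (cur.reverse :: acc) (by simpa using hf)]
        by_cases h2 : rest.contains c
        · rw [if_pos h2, if_pos (by simp), pv_lastSeg_cons_mem c c rest h2]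
        · rw [if_neg h2, if_pos (by simp)]
          have hrest : pvLastSeg c (c :: rest) = rest := by
            unfold pvLastSeg
            rw [List.reverse_cons, List.takeWhile_append]
            rw [if_pos (by rw [pv_tw_full _ _ (fun x hx => by
              simp only [List.mem_reverse] at hx
              simp only [Bool.not_eq_eq_eq_not, Bool.not_true, beq_eq_false_iff_ne, ne_eq]
              intro he; subst he
              simp only [List.contains_eq_mem, decide_eq_true_eq] at h2
              exact h2 hx)])]
            simp [List.takeWhile]
          rw [hrest]
          simp
      · rw [show PySem.Chars.splitOn.go [d] (n+1) (c :: rest) cur acc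
            = PySem.Chars.splitOn.go [d] n rest (c :: cur) acc by
          simp [PySem.Chars.splitOn.go, List.isPrefixOf, beq_iff_eq, (Ne.symm hcd : ¬ d = c)]]
        rw [ih n (c :: cur) acc (by simpa using hf)]
        by_cases h2 : rest.contains d
        · rw [if_pos h2, if_pos (by simp [List.contains_eq_mem] at h2 ⊢; exact Or.inr h2),
            pv_lastSeg_cons_mem d c rest h2]
        · rw [if_neg h2, if_neg (by
            simp only [List.contains_eq_mem, decide_eq_true_eq, List.mem_cons] at h2 ⊢
            rintro (h | h)
            · exact hcd h.symm
            · exact h2 h)]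
          simp

lemma pv_go0 (sep : List Char) : ∀ (l : List Char) (fuel : Nat) (cur : List Char)
    (acc : List (List Char)),
    PySem.Chars.splitOnMax.go sep fuel 0 l cur acc = ((cur.reverse ++ l) :: acc).reverse := by
  intro l fuel cur acc
  cases fuel with
  | zero => simp [PySem.Chars.splitOnMax.go]
  | succ n => cases l <;> simp [PySem.Chars.splitOnMax.go]

lemma pv_go1 (sep : List Char) (hsep : sep ≠ []) : ∀ (l : List Char) (fuel : Nat)
    (cur : List Char) (acc : List (List Char)), l.length ≤ fuel →
    PySem.Chars.splitOnMax.go sep fuel 1 l cur acc =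
      (match pvSp1 sep l with
       | some p => (p.2 :: (cur.reverse ++ p.1) :: acc).reverse
       | none => ((cur.reverse ++ l) :: acc).reverse) := by
  intro l
  induction l with
  | nil =>
    intro fuel cur acc _
    rw [pv_sp1_nil sep hsep]
    cases fuel <;> simp [PySem.Chars.splitOnMax.go]
  | cons c rest ih =>
    intro fuel cur acc hf
    cases fuel with
    | zero => simp at hf
    | succ n =>
      by_cases hp : sep.isPrefixOf (c :: rest)
      · rw [show PySem.Chars.splitOnMax.go sep (n+1) 1 (c :: rest) cur acc
            = PySem.Chars.splitOnMax.go sep n 0 ((c :: rest).drop sep.length) [] (cur.reverse :: acc) by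
          simp [PySem.Chars.splitOnMax.go, hp]]
        rw [pv_go0]
        simp [pvSp1, hp]
      · rw [show PySem.Chars.splitOnMax.go sep (n+1) 1 (c :: rest) cur acc
            = PySem.Chars.splitOnMax.go sep n 1 rest (c :: cur) acc by
          simp [PySem.Chars.splitOnMax.go, hp]]
        rw [ih n (c :: cur) acc (by simpa using hf)]
        simp only [pvSp1, hp, if_neg]
        cases hs : pvSp1 sep rest with
        | none => simp
        | some p => simp

lemma pv_sp1_single (d : Char) : ∀ gp : List Char,
    (match pvSp1 [d] gp with | some p => p.1 | none => gp)
      = gp.takeWhile (fun c => !(c == d)) := by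
  intro gp
  induction gp with
  | nil => simp [pvSp1]
  | cons c rest ih =>
    by_cases hdc : d = c
    · subst hdc
      have hpre : ([d]).isPrefixOf (d :: rest) = true := by simp [List.isPrefixOf]
      simp [pvSp1, hpre, List.takeWhile]
    · have hpre : ([d]).isPrefixOf (c :: rest) = false := by
        simp [List.isPrefixOf]; exact fun h => hdc h
      have htw : List.takeWhile (fun x => !(x == d)) (c :: rest)
          = c :: List.takeWhile (fun x => !(x == d)) rest := by
        rw [List.takeWhile_cons_of_pos]
        simp
        exact fun h => hdc h.symm
      rw [htw]
      rw [show pvSp1 [d] (c :: rest) = (pvSp1 [d] rest).map (fun p => (c :: p.1, p.2)) by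
        simp [pvSp1, hpre]]
      cases hs : pvSp1 [d] rest with
      | none => rw [hs] at ih; simpa using ih
      | some p => rw [hs] at ih; simpa using ih

lemma pv_first (d : Char) (gp : List Char) :
    (PySem.List.pyGet? (PySem.Chars.splitOnMax gp [d] 1) 0).getD []
      = gp.takeWhile (fun c => !(c == d)) := by
  rw [show PySem.Chars.splitOnMax gp [d] 1
      = PySem.Chars.splitOnMax.go [d] (gp.length + 1) 1 gp [] [] by
    simp [PySem.Chars.splitOnMax]]
  rw [pv_go1 [d] (by simp) gp (gp.length + 1) [] [] (by omega)]
  rw [← pv_sp1_single d gp]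
  cases hs : pvSp1 [d] gp with
  | none => simp [PySem.List.pyGet?, PySem.List.pyIdx?]
  | some p => simp [PySem.List.pyGet?, PySem.List.pyIdx?]

lemma pv_pyGet_neg_one {α : Type} (xs : List α) : PySem.List.pyGet? xs (-1) = xs.getLast? := by
  simp only [PySem.List.pyGet?, PySem.List.pyIdx?, Int.reduceNeg, Int.neg_nonneg, Int.reduceLE,
    ↓reduceIte, neg_le_neg_iff, Nat.one_le_cast, neg_neg, Int.toNat_one]
  rcases xs with _ | ⟨a, t⟩
  · simp
  · simp [List.getLast?_eq_getElem?]

lemma pv_last (gp : List Char) :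
    (PySem.List.pyGet? (PySem.Chars.splitOn gp [':']) (-1)).getD []
      = pvLastSeg ':' gp := by
  have h := pv_pyGet_neg_one (PySem.Chars.splitOn gp [':'])
  rw [h]
  rw [show PySem.Chars.splitOn gp [':']
      = PySem.Chars.splitOn.go [':'] (gp.length + 1) gp [] [] by
    simp [PySem.Chars.splitOn]]
  rw [pv_lastGo ':' gp (gp.length + 1) [] [] (by omega)]
  by_cases hc : gp.contains ':'
  · rw [if_pos hc]
    simp
  · simp only [hc, Bool.false_eq_true, if_neg, if_false, List.reverse_nil, List.nil_append,
      Option.getD_some]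
    rw [pv_lastSeg_not_mem ':' gp (by
      simp only [List.contains_eq_mem, decide_eq_true_eq] at hc; exact hc)]

lemma pv_tw_comb (gp : List Char) :
    (gp.takeWhile (fun c => !(c == ','))).takeWhile (fun c => !(c == '('))
      = gp.takeWhile pvP := by
  rw [List.takeWhile_takeWhile]
  congr 1
  funext a
  by_cases h1 : a = '(' <;> by_cases h2 : a = ',' <;> simp [pvP, h1, h2]

lemma pv_main : ∀ (s : String), parse_gpu_gres s = parse_gpu_gres_alt s := by
  intro s
  have hsub : ("gpu:".toList : List Char) ≠ [] := by decide
  have hfind : PySem.Chars.find s.toList "gpu:".toList =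
      (match pvSp1 "gpu:".toList s.toList with
       | some p => ((0 + p.1.length : Nat) : Int)
       | none => -1) := pv_findGo _ hsub s.toList 0
  cases hs : pvSp1 "gpu:".toList s.toList with
  | none =>
    rw [hs] at hfind
    simp only at hfind
    have hnotin : PySem.Chars.isIn "gpu:".toList s.toList = false := by
      rw [PySem.Chars.isIn_eq_false_iff, ← PySem.Chars.find_eq_neg_one_iff]
      exact hfind
    have hA : parse_gpu_gres s = none := by
      simp only [parse_gpu_gres]
      rw [if_pos]
      rw [hnotin]
      simp
    have hB : parse_gpu_gres_alt s = none := by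
      simp only [parse_gpu_gres_alt]
      rw [hfind]
      norm_num
    rw [hA, hB]
  | some p =>
    obtain ⟨a, b⟩ := p
    rw [hs] at hfind
    simp only at hfind
    have hfind' : PySem.Chars.find s.toList "gpu:".toList = (a.length : Int) := by
      rw [hfind]; simp
    have hinf : "gpu:".toList <:+: s.toList := by
      rw [← PySem.Chars.find_ne_neg_one_iff, hfind']
      simp
    have hisin : PySem.Chars.isIn "gpu:".toList s.toList = true := by
      cases h : PySem.Chars.isIn "gpu:".toList s.toList
      · rw [PySem.Chars.isIn_eq_false_iff] at h
        exact absurd hinf h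
      · rfl
    have hne : s.toList ≠ [] := by
      intro h
      rw [h, pv_sp1_nil _ hsub] at hs
      simp at hs
    have hnen : s.toList ≠ ['(', 'n', 'u', 'l', 'l', ')'] := by
      intro h
      rw [h] at hs
      have hnull : pvSp1 "gpu:".toList ['(', 'n', 'u', 'l', 'l', ')'] = none := by decide
      rw [hnull] at hs
      simp at hs
    have hparts : PySem.List.pyGet? (PySem.Chars.splitOnMax s.toList "gpu:".toList 1) 1 = some b := by
      rw [show PySem.Chars.splitOnMax s.toList "gpu:".toList 1
          = PySem.Chars.splitOnMax.go "gpu:".toList (s.toList.length + 1) 1 s.toList [] [] by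
        simp [PySem.Chars.splitOnMax]]
      rw [pv_go1 _ hsub s.toList (s.toList.length + 1) [] [] (by omega), hs]
      simp [PySem.List.pyGet?, PySem.List.pyIdx?]
    have hb : PySem.List.slice s.toList (some (PySem.Chars.find s.toList "gpu:".toList + 4)) none = b := by
      rw [hfind']
      rw [show ((a.length : Nat) : Int) + 4 = ((a.length + 4 : Nat) : Int) by push_cast; ring]
      rw [PySem.List.slice_from_natCast]
      have hdrop := pv_sp1_drop _ _ _ _ hs
      rw [show ("gpu:".toList.length) = 4 from by decide] at hdrop
      exact hdrop.symm
    have htok : pvScanTok b [] = pvLastSeg ':' (b.takeWhile pvP) := by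
      rw [pv_scanTok]
      by_cases hc : (b.takeWhile pvP).contains ':'
      · rw [if_pos hc]
      · rw [if_neg hc, List.nil_append]
        rw [pv_lastSeg_not_mem ':' _ (by
          simp only [List.contains_eq_mem, decide_eq_true_eq] at hc; exact hc)]
    have hA : parse_gpu_gres s = (
        let gp2 := PySem.Chars.strip (pvLastSeg ':' (b.takeWhile pvP))
        if !(PySem.Chars.strIsdigit gp2) then none
        else
          match PySem.Int.ofChars? gp2 with
          | none => none
          | some count => if 1 ≤ count ∧ count ≤ 8 then some count else none) := by
      simp only [parse_gpu_gres]
      rw [if_neg (by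
        rw [hisin]
        simp [List.isEmpty_iff, hne, hnen])]
      rw [hparts]
      simp only [List.foldl_cons, List.foldl_nil, pv_first, pv_last, pv_tw_comb]
    have hB : parse_gpu_gres_alt s = (
        let gp2 := PySem.Chars.strip (pvLastSeg ':' (b.takeWhile pvP))
        if !(PySem.Chars.strIsdigit gp2) then none
        else
          match PySem.Int.ofChars? gp2 with
          | none => none
          | some count => if 1 ≤ count ∧ count ≤ 8 then some count else none) := by
      simp only [parse_gpu_gres_alt]
      rw [if_neg (by rw [hfind']; simp)]
      rw [hb, htok]
    rw [hA, hB]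

-- ===== VERDICT (by name: the statement is the Claim_ definition above) =====
theorem parse_gpu_gres_spec : Claim_equal_parse_gpu_gres := by
  intro s _
  exact pv_main s
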